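-- pv_equiv track=rewrite | github.com/CostaLab/phlower | phlower/tools/harmonic_pseudo_tree.py | max_node_series_type
-- ===== SOURCE A (Python) =====
-- from collections import Counter, defaultdict
--
-- def max_node_series_type(counter, leaves_index):
--     """
--     For the fate_tree, check each trajectory branch maximum celltypes
--     """
--
--     name_group = {key:key.split("_")[0] for key in counter}
--     inv_bdict = {}
--     for k, v in name_group.items():
--         inv_bdict[v] = inv_bdict.get(v, []) + [k]
--
--     max_dict = {}
--     for k, vs in inv_bdict.items():
--         s = Counter()
--         for v in vs:
--             s += counter[v]
--         maxx = max(s, key=s.get)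
--         if k in leaves_index:
--             max_dict[k] = maxx
--     return max_dict, {k:v for k,v in inv_bdict.items() if k in leaves_index}
-- ===== SOURCE B (Python) =====
-- from collections import Counter
--
-- def max_node_series_type(counter, leaves_index):
--     groups = []
--     for key in counter:
--         g = key.split("_")[0]
--         if g not in groups:
--             groups.append(g)
--     keys_of = {g: [k for k in counter if k.split("_")[0] == g]
--                for g in groups if g in leaves_index}
--     max_dict = {}
--     for g, ks in keys_of.items():
--         acc = Counter()
--         for k in ks:
--             acc = acc + Counter(counter[k])
--         max_dict[g] = max(acc, key=acc.get)
--     return max_dict, keys_of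
-- ===== Notes on version B (the rewrite author's own statement) =====
-- stated objective: simpler
-- what changed: B drops A's key->group dict and its inversion: it deduplicates the group names in one pass, builds the group->keys table only for leaf groups by filtering the key list per group, and sums each leaf group's counters with Counter.__add__ instead of the in-place += loop, so non-leaf groups are never summed or arg-maxed.
import Mathlib
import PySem

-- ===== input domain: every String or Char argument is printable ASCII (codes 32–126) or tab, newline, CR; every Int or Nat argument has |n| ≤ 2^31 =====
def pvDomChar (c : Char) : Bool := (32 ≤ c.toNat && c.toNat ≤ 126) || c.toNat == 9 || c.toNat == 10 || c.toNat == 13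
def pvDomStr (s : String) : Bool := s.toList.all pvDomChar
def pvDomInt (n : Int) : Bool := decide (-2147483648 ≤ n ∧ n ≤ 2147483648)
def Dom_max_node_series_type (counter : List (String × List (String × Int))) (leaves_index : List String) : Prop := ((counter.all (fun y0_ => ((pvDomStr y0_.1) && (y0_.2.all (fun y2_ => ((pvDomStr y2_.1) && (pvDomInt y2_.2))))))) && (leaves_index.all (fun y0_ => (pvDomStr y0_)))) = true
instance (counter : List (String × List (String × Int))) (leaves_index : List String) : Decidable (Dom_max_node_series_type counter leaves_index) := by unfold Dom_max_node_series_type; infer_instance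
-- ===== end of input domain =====

-- B replaces A's two grouping dicts (key→group, then inverted group→keys) by one deduplicated
-- group list plus per-group filters over the keys, builds only the leaf groups, and folds the
-- counters with Counter.__add__'s merge shape instead of the element-wise __iadd__ loop (objective: simpler).

-- ===== PORT A =====
-- key.split("_")[0]; split with a non-empty separator is always a non-empty list, so the
-- Option defaults never fire (both Pythons compute this expression).
def pvGroup (k : String) : String :=
  (PySem.List.pyGet? ((PySem.Str.split? k "_").getD [k]) 0).getD ""

-- Counter.__iadd__ ('s += counter[v]'): 'self[e] = cnt + self[e]' for each item of the other
-- mapping, then _keep_positive (delete the non-positive entries, order kept).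
def pvCAddA (s c : PySem.Dict String Int) : PySem.Dict String Int :=
  PySem.Dict.mk
    ((c.items.foldl (fun t e => t.insert e.1 (e.2 + t.getD e.1 0)) s).items.filter
      (fun p => decide (0 < p.2)))

-- max(s, key=s.get): first key with maximal count; on an empty counter Python raises
-- ValueError (excluded by Pre_), the port returns "".
def pvArgmax (s : PySem.Dict String Int) : String :=
  (PySem.List.max? s.keys (fun k => s.getD k 0)).getD ""

def max_node_series_type (counter : List (String × List (String × Int))) (leaves_index : List String) : (List (String × String)) × (List (String × List String)) :=
  let counterD : PySem.Dict String (List (String × Int)) := PySem.Dict.mk counter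
  -- name_group = {key: key.split("_")[0] for key in counter}
  let name_group : PySem.Dict String String :=
    counterD.keys.foldl (fun d key => d.insert key (pvGroup key)) PySem.Dict.empty
  -- for k, v in name_group.items(): inv_bdict[v] = inv_bdict.get(v, []) + [k]
  let inv_bdict : PySem.Dict String (List String) :=
    name_group.items.foldl (fun d kv => d.insert kv.2 (d.getD kv.2 [] ++ [kv.1])) PySem.Dict.empty
  -- for k, vs in inv_bdict.items(): s = Counter(); s += counter[v]; maxx = max(s, key=s.get); if k in leaves_index: max_dict[k] = maxx
  let max_dict : PySem.Dict String String :=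
    inv_bdict.items.foldl (fun md kvs =>
      let s := kvs.2.foldl (fun s v => pvCAddA s (PySem.Dict.mk (counterD.getD v []))) PySem.Dict.empty
      let maxx := pvArgmax s
      if leaves_index.contains kvs.1 then md.insert kvs.1 maxx else md) PySem.Dict.empty
  (max_dict.items,
   (inv_bdict.items.foldl
      (fun d kv => if leaves_index.contains kv.1 then d.insert kv.1 kv.2 else d)
      (PySem.Dict.empty : PySem.Dict String (List String))).items)

-- ===== PORT B =====
-- Counter.__add__ ('acc + Counter(counter[k])'): updated entries of self, then the fresh
-- entries of other, keeping the positive ones (the two inline positivity tests of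
-- Counter.__add__ written as one filter over the concatenation).
def pvCAddB (s c : PySem.Dict String Int) : PySem.Dict String Int :=
  PySem.Dict.mk
    (((s.items.map (fun p => (p.1, p.2 + c.getD p.1 0)) ++
       c.items.filter (fun q => !(s.contains q.1))).filter (fun p => decide (0 < p.2))))

def max_node_series_type_alt (counter : List (String × List (String × Int))) (leaves_index : List String) : (List (String × String)) × (List (String × List String)) :=
  let counterD : PySem.Dict String (List (String × Int)) := PySem.Dict.mk counter
  -- groups: distinct group names in first-occurrence order
  let groups : PySem.Set String :=
    counterD.keys.foldl (fun gs key => PySem.Set.add gs (pvGroup key)) PySem.Set.empty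
  -- keys_of = {g: [k for k in counter if k.split("_")[0] == g] for g in groups if g in leaves_index}
  let keys_of : PySem.Dict String (List String) :=
    groups.foldl (fun d g =>
      if leaves_index.contains g then
        d.insert g (counterD.keys.filter (fun k => pvGroup k == g))
      else d) PySem.Dict.empty
  -- for g, ks in keys_of.items(): acc = Counter(); acc = acc + Counter(counter[k]); max_dict[g] = max(acc, key=acc.get)
  let max_dict : PySem.Dict String String :=
    keys_of.items.foldl (fun md gks =>
      md.insert gks.1 (pvArgmax
        (gks.2.foldl (fun a k => pvCAddB a (PySem.Dict.mk (counterD.getD k []))) PySem.Dict.empty)))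
      PySem.Dict.empty
  (max_dict.items, keys_of.items)

-- ===== PRECONDITION & SPEC =====
def pvVals (counter : List (String × List (String × Int))) (g : String) : List (List (String × Int)) :=
  (counter.filter (fun q => pvGroup q.1 == g)).map Prod.snd

-- the summed (positively clamped) Counter of group g is non-empty: some celltype of the group
-- has a positive suffix sum over the group's counters
def pvGroupOKb (counter : List (String × List (String × Int))) (g : String) : Bool :=
  counter.any (fun q => pvGroup q.1 == g && (q.2.map Prod.fst).any (fun c =>
    (List.range (pvVals counter g).length).any (fun j =>
      decide (0 < (((pvVals counter g).drop j).map (fun d => (PySem.Dict.mk d).getD c 0)).sum))))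

-- Pre_ excludes association lists with duplicate outer or inner keys (not faithful images of a
-- Python dict, whose keys are unique) and inputs where some branch group's summed positive
-- counter is empty, on which Python A raises ValueError at max() of an empty Counter.
def Pre_max_node_series_type (counter : List (String × List (String × Int))) (leaves_index : List String) : Prop :=
  (counter.map Prod.fst).Nodup ∧ (∀ p ∈ counter, (p.2.map Prod.fst).Nodup) ∧
  ∀ p ∈ counter, pvGroupOKb counter (pvGroup p.1) = true
instance (counter : List (String × List (String × Int))) (leaves_index : List String) : Decidable (Pre_max_node_series_type counter leaves_index) := by unfold Pre_max_node_series_type; infer_instance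

def pvWitness_max_node_series_type : (List (String × List (String × Int))) × List String :=
  ([("a_1", [("x", 2)]), ("a_2", [("y", 1)]), ("b_1", [("z", 3)])], ["a"])

def Spec_max_node_series_type (counter : List (String × List (String × Int))) (leaves_index : List String) (out : (List (String × String)) × (List (String × List String))) : Prop := out = max_node_series_type_alt counter leaves_index
instance (counter : List (String × List (String × Int))) (leaves_index : List String) (out : (List (String × String)) × (List (String × List String))) : Decidable (Spec_max_node_series_type counter leaves_index out) := by unfold Spec_max_node_series_type; infer_instance

-- ===== CLAIM (what is proved, stated in full; the proofs are below) =====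
def Claim_equal_max_node_series_type : Prop := ∀ (counter : List (String × List (String × Int))) (leaves_index : List String), Dom_max_node_series_type counter leaves_index → Pre_max_node_series_type counter leaves_index → Spec_max_node_series_type counter leaves_index (max_node_series_type counter leaves_index)


-- ===== LEMMAS AND PROOFS =====

lemma pvMk_getD_of_not_mem (l : List (String × Int)) (x : String)
    (hx : x ∉ l.map Prod.fst) : (PySem.Dict.mk l).getD x 0 = 0 := by
  induction l with
  | nil => rfl
  | cons e l ih =>
      simp only [List.map_cons, List.mem_cons] at hx
      push Not at hx
      rw [PySem.Dict.getD_eq_get?_getD, PySem.Dict.get?_mk_cons, if_neg (by simpa using Ne.symm hx.1)]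
      simpa [PySem.Dict.getD_eq_get?_getD] using ih hx.2


lemma pvFoldCore (l : List (String × Int)) : ∀ (s : PySem.Dict String Int),
    (l.map Prod.fst).Nodup → s.keys.Nodup →
    (l.foldl (fun t e => t.insert e.1 (e.2 + t.getD e.1 0)) s).items
      = s.items.map (fun p => (p.1, p.2 + (PySem.Dict.mk l).getD p.1 0))
        ++ l.filter (fun q => !(s.contains q.1)) := by
  induction l with
  | nil =>
      intro s _ _
      have h : ∀ p ∈ s.items, (p.1, p.2 + (PySem.Dict.mk ([] : List (String × Int))).getD p.1 0) = p := by
        intro p _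
        have h0 : (PySem.Dict.mk ([] : List (String × Int))).getD p.1 0 = 0 := rfl
        rw [h0]; simp
      simp [List.map_congr_left h]
  | cons e l ih =>
      intro s hl hs
      simp only [List.map_cons, List.nodup_cons] at hl
      obtain ⟨he1, hl'⟩ := hl
      simp only [List.foldl_cons]
      have hs' : (s.insert e.1 (e.2 + s.getD e.1 0)).keys.Nodup :=
        PySem.Dict.nodup_keys_insert s _ _ hs
      rw [ih (s.insert e.1 (e.2 + s.getD e.1 0)) hl' hs']
      have hmkc : ∀ x : String, x ≠ e.1 →
          (PySem.Dict.mk (e :: l)).getD x 0 = (PySem.Dict.mk l).getD x 0 := by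
        intro x hx
        rw [PySem.Dict.getD_eq_get?_getD, PySem.Dict.get?_mk_cons,
            if_neg (by simpa using Ne.symm hx), ← PySem.Dict.getD_eq_get?_getD]
      have hmke : (PySem.Dict.mk (e :: l)).getD e.1 0 = e.2 := by
        rw [PySem.Dict.getD_eq_get?_getD, PySem.Dict.get?_mk_cons, if_pos (by simp)]
        rfl
      have hmkl : (PySem.Dict.mk l).getD e.1 0 = 0 := pvMk_getD_of_not_mem l e.1 he1
      by_cases hc : s.contains e.1 = true
      · rw [PySem.Dict.items_insert_of_contains s _ hc, List.map_map]
        have hmap : ∀ p ∈ s.items,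
            ((fun p => (p.1, p.2 + (PySem.Dict.mk l).getD p.1 0)) ∘
              (fun p => if (p.1 == e.1) = true then (e.1, e.2 + s.getD e.1 0) else p)) p
            = (p.1, p.2 + (PySem.Dict.mk (e :: l)).getD p.1 0) := by
          intro p hp
          by_cases hpe : p.1 = e.1
          · have hval : s.getD e.1 0 = p.2 := by
              have : (e.1, p.2) ∈ s.items := by
                have := hp; rwa [show p = (e.1, p.2) from by rw [← hpe]] at this
              exact PySem.Dict.getD_of_mem_items s this hs 0
            simp only [Function.comp_apply]
            rw [if_pos (show (p.1 == e.1) = true by simpa using hpe)]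
            simp only [hval, hmkl, hpe, hmke]
            simp only [Prod.mk.injEq, true_and]
            omega
          · simp only [Function.comp_apply]
            rw [if_neg (show ¬ (p.1 == e.1) = true by simpa using hpe)]
            rw [hmkc p.1 hpe]
        rw [List.map_congr_left hmap]
        have hfil : List.filter (fun q => !(s.insert e.1 (e.2 + s.getD e.1 0)).contains q.1) l
            = List.filter (fun q => !(s.contains q.1)) (e :: l) := by
          rw [List.filter_cons_of_neg (by simpa using hc)]
          refine List.filter_congr ?_
          intro q hq
          rw [PySem.Dict.contains_insert]
          by_cases hqe : q.1 = e.1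
          · rw [hqe]; simp [hc]
          · simp [hqe]
        rw [hfil]
      · have hc' : s.contains e.1 = false := by simpa using hc
        rw [PySem.Dict.items_insert_of_not_contains s _ hc',
            PySem.Dict.getD_of_not_contains s 0 hc']
        rw [List.map_append]
        have hmap : ∀ p ∈ s.items,
            (p.1, p.2 + (PySem.Dict.mk l).getD p.1 0)
            = (p.1, p.2 + (PySem.Dict.mk (e :: l)).getD p.1 0) := by
          intro p hp
          have hpe : p.1 ≠ e.1 := by
            intro h
            have : s.contains e.1 = true := by
              rw [PySem.Dict.contains_iff_mem_keys]
              rw [← h]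
              exact List.mem_map_of_mem hp
            simp [this] at hc'
          rw [hmkc p.1 hpe]
        rw [List.map_congr_left hmap]
        have hfil : List.filter (fun q => !(s.insert e.1 (e.2 + 0)).contains q.1) l
            = List.filter (fun q => !(s.contains q.1)) l := by
          refine List.filter_congr ?_
          intro q hq
          rw [PySem.Dict.contains_insert]
          have hqe : q.1 ≠ e.1 := by
            intro h; exact he1 (h ▸ List.mem_map_of_mem hq)
          simp [hqe]
        rw [hfil, List.filter_cons_of_pos (by simpa using hc')]
        simp [hmkl]


lemma pvCAdd_eq (s c : PySem.Dict String Int)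
    (hs : s.keys.Nodup) (hc : (c.items.map Prod.fst).Nodup) :
    pvCAddA s c = pvCAddB s c := by
  unfold pvCAddA pvCAddB
  rw [pvFoldCore c.items s hc hs]

lemma pvCAddB_nodup (s c : PySem.Dict String Int)
    (hs : s.keys.Nodup) (hc : (c.items.map Prod.fst).Nodup) :
    (pvCAddB s c).keys.Nodup := by
  unfold pvCAddB
  show (List.map Prod.fst _).Nodup
  have hsub : (List.map Prod.fst
      ((s.items.map (fun p => (p.1, p.2 + c.getD p.1 0)) ++
        c.items.filter (fun q => !(s.contains q.1))).filter (fun p => decide (0 < p.2)))).Sublist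
      (List.map Prod.fst (s.items.map (fun p => (p.1, p.2 + c.getD p.1 0)) ++
        c.items.filter (fun q => !(s.contains q.1)))) :=
    List.Sublist.map Prod.fst List.filter_sublist
  refine List.Nodup.sublist hsub ?_
  rw [List.map_append, List.map_map]
  rw [List.nodup_append]
  refine ⟨by simpa [Function.comp] using hs, ?_, ?_⟩
  · exact List.Nodup.sublist (List.Sublist.map Prod.fst List.filter_sublist) hc
  · intro x hx y hy
    obtain ⟨q, hq, rfl⟩ := List.mem_map.mp hy
    have hqf := List.of_mem_filter hq
    rintro rfl
    have : s.contains q.1 = true := by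
      rw [PySem.Dict.contains_iff_mem_keys]
      simpa [Function.comp, PySem.Dict.keys] using hx
    simp [this] at hqf

-- abbreviations used by the proofs
def pvK (counter : List (String × List (String × Int))) : List String := counter.map Prod.fst
def pvF (counter : List (String × List (String × Int))) (g : String) : List String :=
  (pvK counter).filter (fun k => pvGroup k == g)
def pvG (counter : List (String × List (String × Int))) : List String :=
  PySem.Set.ofList ((pvK counter).map pvGroup)

-- A's name_group comprehension is the key list tagged with its groups
lemma pvNameGroup (counter : List (String × List (String × Int)))
    (h1 : (pvK counter).Nodup) :
    ((PySem.Dict.mk counter).keys.foldl (fun d key => d.insert key (pvGroup key))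
      (PySem.Dict.empty : PySem.Dict String String)).items
      = (pvK counter).map (fun k => (k, pvGroup k)) := by
  have := PySem.Dict.items_foldl_insert_fresh (pvK counter) (fun a => a) pvGroup
      (PySem.Dict.empty : PySem.Dict String String)
      (fun a _ => by simp [PySem.Dict.contains_empty]) (by simpa using h1)
  simpa using this

-- A's inverted dict: items are the distinct groups paired with their key lists
lemma pvInv (counter : List (String × List (String × Int))) :
    (((pvK counter).map (fun k => (k, pvGroup k))).foldl
        (fun d kv => d.insert kv.2 (d.getD kv.2 [] ++ [kv.1]))
        (PySem.Dict.empty : PySem.Dict String (List String))).items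
      = (pvG counter).map (fun g => (g, pvF counter g)) := by
  have hfun : (((pvK counter).map (fun k => (k, pvGroup k))).foldl
        (fun d kv => d.insert kv.2 (d.getD kv.2 [] ++ [kv.1]))
        (PySem.Dict.empty : PySem.Dict String (List String)))
      = (((pvK counter).map (fun k => (pvGroup k, k))).foldl
        (fun d p => d.modify p.1 [] (fun x => x ++ [p.2]))
        (PySem.Dict.empty : PySem.Dict String (List String))) := by
    rw [List.foldl_map, List.foldl_map]
    rfl
  rw [hfun]
  have hnd : (((pvK counter).map (fun k => (pvGroup k, k))).foldl
        (fun d p => d.modify p.1 [] (fun x => x ++ [p.2]))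
        (PySem.Dict.empty : PySem.Dict String (List String))).keys.Nodup := by
    exact PySem.Dict.nodup_keys_foldl_modify_key _ _ _ _ _ (by simp [PySem.Dict.nodup_keys_empty])
  rw [PySem.Dict.items_eq_map_keys _ hnd []]
  have hkeys : (((pvK counter).map (fun k => (pvGroup k, k))).foldl
        (fun d p => d.modify p.1 [] (fun x => x ++ [p.2]))
        (PySem.Dict.empty : PySem.Dict String (List String))).keys = pvG counter := by
    rw [PySem.Dict.keys_foldl_modify_key]
    rw [List.map_map]
    show PySem.Set.update (PySem.Dict.empty : PySem.Dict String (List String)).keys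
        ((pvK counter).map pvGroup) = _
    rw [PySem.Dict.keys_empty, PySem.Set.update_nil_left]
    rfl
  rw [hkeys]
  refine List.map_congr_left ?_
  intro g hg
  rw [PySem.Dict.getD_foldl_modify_append]
  rw [PySem.Dict.getD_of_not_contains _ _ (by simp [PySem.Dict.contains_empty])]
  rw [List.filter_map, List.map_map]
  simp [pvF, Function.comp_def]

-- a guarded insert loop over distinct keys builds exactly the filtered assoc list
lemma pvIfInsertFold {ν : Type} (G : List String) (pc : String → Bool) (v : String → ν)
    (hG : G.Nodup) :
    (G.foldl (fun d g => if pc g then d.insert g (v g) else d)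
      (PySem.Dict.empty : PySem.Dict String ν)).items
      = (G.filter pc).map (fun g => (g, v g)) := by
  have hsplit := PySem.List.foldl_if_eq_foldl_filter pc
      (fun (d : PySem.Dict String ν) g => d.insert g (v g)) G PySem.Dict.empty
  simp only at hsplit
  rw [hsplit]
  have := PySem.Dict.items_foldl_insert_fresh (G.filter pc) (fun a => a) v
      (PySem.Dict.empty : PySem.Dict String ν)
      (fun a _ => by simp [PySem.Dict.contains_empty])
      (by simpa using hG.filter pc)
  simpa using this

lemma pvInsertFold {ν : Type} (G : List String) (v : String → ν) (hG : G.Nodup) :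
    (G.foldl (fun d g => d.insert g (v g))
      (PySem.Dict.empty : PySem.Dict String ν)).items
      = G.map (fun g => (g, v g)) := by
  have := pvIfInsertFold G (fun _ => true) v hG
  simpa using this

lemma pvG_nodup (counter : List (String × List (String × Int))) : (pvG counter).Nodup :=
  PySem.Set.nodup_ofList _

-- per-key counters looked up in the dict have distinct celltype keys
lemma pvInner (counter : List (String × List (String × Int)))
    (h1 : (pvK counter).Nodup)
    (h2 : ∀ p ∈ counter, (p.2.map Prod.fst).Nodup) :
    ∀ v ∈ pvK counter,
      (((PySem.Dict.mk ((PySem.Dict.mk counter).getD v [])).items).map Prod.fst).Nodup := by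
  intro v hv
  obtain ⟨p, hp, rfl⟩ := List.mem_map.mp hv
  have hD : (PySem.Dict.mk counter).getD p.1 [] = p.2 := by
    refine PySem.Dict.getD_of_mem_items _ ?_ ?_ []
    · show (p.1, p.2) ∈ counter
      simpa using hp
    · simpa [PySem.Dict.keys] using h1
  rw [hD]
  exact h2 p hp

-- the per-group summing loop computes the same counter with either Counter addition
lemma pvSumFold (counterD : PySem.Dict String (List (String × Int))) (vs : List String)
    (hinner : ∀ v ∈ vs, (((PySem.Dict.mk (counterD.getD v [])).items).map Prod.fst).Nodup) :
    ∀ acc : PySem.Dict String Int, acc.keys.Nodup →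
    vs.foldl (fun s v => pvCAddA s (PySem.Dict.mk (counterD.getD v []))) acc
      = vs.foldl (fun a k => pvCAddB a (PySem.Dict.mk (counterD.getD k []))) acc := by
  induction vs with
  | nil => intro acc _; rfl
  | cons v vs ih =>
      intro acc hacc
      simp only [List.foldl_cons]
      rw [pvCAdd_eq _ _ hacc (hinner v (List.mem_cons_self))]
      exact ih (fun w hw => hinner w (List.mem_cons_of_mem _ hw)) _
        (pvCAddB_nodup _ _ hacc (hinner v (List.mem_cons_self)))

lemma pvMain (counter : List (String × List (String × Int))) (leaves_index : List String)
    (h1 : (pvK counter).Nodup)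
    (h2 : ∀ p ∈ counter, (p.2.map Prod.fst).Nodup) :
    max_node_series_type counter leaves_index = max_node_series_type_alt counter leaves_index := by
  simp only [max_node_series_type, max_node_series_type_alt]
  -- B's groups list is pvG
  have hgroups : (PySem.Dict.mk counter).keys.foldl
      (fun gs key => PySem.Set.add gs (pvGroup key)) PySem.Set.empty = pvG counter := by
    rw [← PySem.Set.update_map_eq_foldl_add]
    show PySem.Set.update ([] : List String) _ = _
    rw [PySem.Set.update_nil_left]
    rfl
  have hinv : ((((PySem.Dict.mk counter).keys.foldl (fun d key => d.insert key (pvGroup key))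
        (PySem.Dict.empty : PySem.Dict String String)).items).foldl
        (fun d kv => d.insert kv.2 (d.getD kv.2 [] ++ [kv.1]))
        (PySem.Dict.empty : PySem.Dict String (List String))).items
      = (pvG counter).map (fun g => (g, pvF counter g)) := by
    rw [pvNameGroup counter h1, pvInv counter]
  rw [hgroups, hinv]
  have hkeysof : (((pvG counter).foldl (fun d g =>
      if leaves_index.contains g then
        d.insert g ((PySem.Dict.mk counter).keys.filter (fun k => pvGroup k == g))
      else d) (PySem.Dict.empty : PySem.Dict String (List String))).items)
      = ((pvG counter).filter (fun g => leaves_index.contains g)).map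
          (fun g => (g, pvF counter g)) :=
    pvIfInsertFold (pvG counter) (fun g => leaves_index.contains g)
        (fun g => (PySem.Dict.mk counter).keys.filter (fun k => pvGroup k == g))
        (pvG_nodup counter)
  have hsecond : ((((pvG counter).map (fun g => (g, pvF counter g))).foldl
      (fun d kv => if leaves_index.contains kv.1 then d.insert kv.1 kv.2 else d)
      (PySem.Dict.empty : PySem.Dict String (List String))).items)
      = ((pvG counter).filter (fun g => leaves_index.contains g)).map
          (fun g => (g, pvF counter g)) := by
    rw [List.foldl_map]
    exact pvIfInsertFold (pvG counter) (fun g => leaves_index.contains g)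
        (fun g => pvF counter g) (pvG_nodup counter)
  rw [hkeysof, hsecond]
  have hmaxA : ((((pvG counter).map (fun g => (g, pvF counter g))).foldl
      (fun md kvs =>
        if leaves_index.contains kvs.1 then
          md.insert kvs.1 (pvArgmax (kvs.2.foldl
            (fun s v => pvCAddA s (PySem.Dict.mk ((PySem.Dict.mk counter).getD v [])))
            PySem.Dict.empty))
        else md)
      (PySem.Dict.empty : PySem.Dict String String)).items)
      = ((pvG counter).filter (fun g => leaves_index.contains g)).map
          (fun g => (g, pvArgmax ((pvF counter g).foldl
            (fun s v => pvCAddA s (PySem.Dict.mk ((PySem.Dict.mk counter).getD v [])))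
            PySem.Dict.empty))) := by
    rw [List.foldl_map]
    exact pvIfInsertFold (pvG counter) (fun g => leaves_index.contains g)
        (fun g => pvArgmax ((pvF counter g).foldl
            (fun s v => pvCAddA s (PySem.Dict.mk ((PySem.Dict.mk counter).getD v [])))
            PySem.Dict.empty)) (pvG_nodup counter)
  have hmaxB : (((((pvG counter).filter (fun g => leaves_index.contains g)).map
      (fun g => (g, pvF counter g))).foldl
      (fun md gks =>
        md.insert gks.1 (pvArgmax (gks.2.foldl
          (fun a k => pvCAddB a (PySem.Dict.mk ((PySem.Dict.mk counter).getD k [])))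
          PySem.Dict.empty)))
      (PySem.Dict.empty : PySem.Dict String String)).items)
      = ((pvG counter).filter (fun g => leaves_index.contains g)).map
          (fun g => (g, pvArgmax ((pvF counter g).foldl
            (fun a k => pvCAddB a (PySem.Dict.mk ((PySem.Dict.mk counter).getD k [])))
            PySem.Dict.empty))) := by
    rw [List.foldl_map]
    exact pvInsertFold ((pvG counter).filter (fun g => leaves_index.contains g))
        (fun g => pvArgmax ((pvF counter g).foldl
          (fun a k => pvCAddB a (PySem.Dict.mk ((PySem.Dict.mk counter).getD k [])))
          PySem.Dict.empty)) ((pvG_nodup counter).filter _)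
  rw [hmaxA, hmaxB]
  refine congrArg (fun x => (x, _)) ?_
  refine List.map_congr_left ?_
  intro g hg
  refine congrArg (fun y => (g, pvArgmax y)) ?_
  refine pvSumFold (PySem.Dict.mk counter) (pvF counter g) ?_ PySem.Dict.empty
    (by simp [PySem.Dict.nodup_keys_empty, PySem.Dict.keys_empty])
  intro v hv
  exact pvInner counter h1 h2 v (List.mem_of_mem_filter hv)


-- ===== VERDICT (by name: the statement is the Claim_ definition above) =====
theorem max_node_series_type_spec : Claim_equal_max_node_series_type := by
  intro counter leaves_index _ hpre
  obtain ⟨h1, h2, _⟩ := hpre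
  unfold Spec_max_node_series_type
  exact pvMain counter leaves_index h1 h2
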